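-- pv_equiv track=rewrite | github.com/google-research/text-to-text-transfer-transformer | t5/seqio/experimental.py | _get_fully_cached_name
-- ===== SOURCE A (Python) =====
-- from typing import Callable, Iterable, Mapping, Optional, Sequence
--
-- def _get_fully_cached_name(
--     original_name: str,
--     sequence_length: Mapping[str, int]
-- ) -> str:
--   """Generates name for fully-cached task or mixture."""
--   new_name = f'{original_name}_'
--   # Find shortest unique prefix.
--   prefix_len = 0
--   while (len(set(feat[:prefix_len] for feat in sequence_length)) !=
--          len(sequence_length)):
--     prefix_len += 1
--   new_name += '_'.join(
--       f'{feat[:prefix_len]}{sequence_length[feat]}' for feat in sequence_length)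
--   return new_name
-- ===== SOURCE B (Python) =====
-- def _get_fully_cached_name(original_name, sequence_length):
--   """Generates name for fully-cached task or mixture (binary search on prefix length)."""
--   keys = list(sequence_length)
--   hi = 0
--   for k in keys:
--     hi = max(hi, len(k))
--   # Binary search for the shortest prefix length making all keys' prefixes unique:
--   # the predicate is monotone in the prefix length and holds at the maximum key length.
--   lo = 0
--   while lo < hi:
--     mid = (lo + hi) // 2
--     if len({k[:mid] for k in keys}) == len(keys):
--       hi = mid
--     else:
--       lo = mid + 1
--   return (original_name + '_' +
--           '_'.join(f'{k[:lo]}{v}' for k, v in sequence_length.items()))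
-- ===== Notes on version B (the rewrite author's own statement) =====
-- stated objective: faster
-- what changed: Replaces A's linear scan over candidate prefix lengths (rebuilding the whole prefix set at every length) by a binary search on the monotone predicate 'all length-L prefixes are distinct', bracketed by the maximum key length, and builds the result from items() pairs instead of per-key dict lookups.
import Mathlib
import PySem

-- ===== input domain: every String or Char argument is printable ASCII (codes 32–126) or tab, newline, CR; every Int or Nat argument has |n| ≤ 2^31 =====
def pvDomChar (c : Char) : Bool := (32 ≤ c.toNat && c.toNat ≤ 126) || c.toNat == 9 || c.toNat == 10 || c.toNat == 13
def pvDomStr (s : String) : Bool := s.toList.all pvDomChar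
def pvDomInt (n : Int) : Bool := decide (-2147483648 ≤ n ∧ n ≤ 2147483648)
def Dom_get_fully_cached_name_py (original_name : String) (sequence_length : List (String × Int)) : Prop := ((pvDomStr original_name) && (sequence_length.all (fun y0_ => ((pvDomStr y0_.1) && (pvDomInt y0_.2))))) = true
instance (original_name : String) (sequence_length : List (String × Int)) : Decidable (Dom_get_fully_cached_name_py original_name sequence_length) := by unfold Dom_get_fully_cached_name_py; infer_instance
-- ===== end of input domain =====

-- B replaces A's linear scan over prefix lengths (each step rebuilding the prefix set) by a
-- binary search on the monotone predicate "all prefixes of this length are distinct".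

-- ===== PORT A =====

-- len(set(feat[:L] for feat in keys))  — the set size A's while-condition recomputes
def pvAPrefSetLen (keys : List String) (L : Nat) : Nat :=
  (PySem.Set.ofList (keys.map (fun feat => PySem.Str.slice feat none (some (L : Int))))).length

-- max(len(k) for k in keys) (0 for no keys); B's python computes this loop, and A's
-- while-loop termination measure cites it (the loop stops by the time L reaches it).
def pvMaxKeyLen (keys : List String) : Nat :=
  keys.foldl (fun m k => max m k.toList.length) 0

lemma pvMaxKeyLen_bound (keys : List String) (k : String) (hk : k ∈ keys) :
    k.toList.length ≤ pvMaxKeyLen keys := by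
  have h := (PySem.List.le_foldl_max (keys.map (fun s => s.toList.length)) 0).2
  have := h k.toList.length (List.mem_map_of_mem hk)
  simpa [pvMaxKeyLen, List.foldl_map] using this

lemma pvToList_slice (s : String) (L : Nat) :
    (PySem.Str.slice s none (some (L : Int))).toList = s.toList.take L := by
  rw [PySem.Str.toList_slice]
  exact PySem.List.slice_to_natCast s.toList L

-- at L ≥ every key length the slices are the keys themselves
lemma pvMap_slice_eq_self (keys : List String) (L : Nat) (h : pvMaxKeyLen keys ≤ L) :
    keys.map (fun k => PySem.Str.slice k none (some (L : Int))) = keys := by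
  have : ∀ k ∈ keys, PySem.Str.slice k none (some (L : Int)) = k := by
    intro k hk
    apply String.toList_inj.mp
    have hlen : k.toList.length ≤ L := le_trans (pvMaxKeyLen_bound keys k hk) h
    rw [pvToList_slice, List.take_of_length_le hlen]
  calc keys.map (fun k => PySem.Str.slice k none (some (L : Int)))
      = keys.map id := List.map_congr_left this
    _ = keys := List.map_id keys

lemma pvALoop_dec (keys : List String) (hnd : keys.Nodup) (L : Nat)
    (h : pvAPrefSetLen keys L ≠ keys.length) : L < pvMaxKeyLen keys := by
  by_contra hle
  apply h
  unfold pvAPrefSetLen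
  rw [pvMap_slice_eq_self keys L (by omega), PySem.Set.ofList_eq_self_of_nodup keys hnd]

-- the while-loop: prefix_len = 0; while len(set(...)) != len(keys): prefix_len += 1
def pvALoop (keys : List String) (hnd : keys.Nodup) (L : Nat) : Nat :=
  if pvAPrefSetLen keys L ≠ keys.length then pvALoop keys hnd (L + 1) else L
termination_by pvMaxKeyLen keys - L
decreasing_by
  have := pvALoop_dec keys hnd L (by assumption)
  omega

def get_fully_cached_name_py (original_name : String) (sequence_length : List (String × Int)) : String :=
  let d := PySem.Dict.ofList sequence_length
  let new_name := original_name ++ "_"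
  let prefix_len := pvALoop d.keys (PySem.Dict.nodup_keys_ofList sequence_length) 0
  -- sequence_length[feat]: feat ∈ keys, so the lookup always succeeds; getD's default is never used
  new_name ++ PySem.Str.join "_" (d.keys.map (fun feat =>
    PySem.Str.slice feat none (some (prefix_len : Int)) ++ PySem.Int.toStr (d.getD feat 0)))

-- ===== PORT B =====

-- len({k[:L] for k in keys}) == len(keys)
def pvBOk (keys : List String) (L : Nat) : Bool :=
  (PySem.Set.ofList (keys.map (fun k => PySem.Str.slice k none (some (L : Int))))).length == keys.length

-- while lo < hi: mid = (lo+hi)//2; if ok(mid): hi = mid else lo = mid+1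
def pvBSearch (keys : List String) (lo hi : Nat) : Nat :=
  if lo < hi then
    let mid := (lo + hi) / 2
    if pvBOk keys mid then pvBSearch keys lo mid else pvBSearch keys (mid + 1) hi
  else lo
termination_by hi - lo
decreasing_by all_goals omega

def get_fully_cached_name_py_alt (original_name : String) (sequence_length : List (String × Int)) : String :=
  let d := PySem.Dict.ofList sequence_length
  let hi := pvMaxKeyLen d.keys
  let lo := pvBSearch d.keys 0 hi
  original_name ++ "_" ++ PySem.Str.join "_" (d.items.map (fun p =>
    PySem.Str.slice p.1 none (some (lo : Int)) ++ PySem.Int.toStr p.2))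

-- ===== PRECONDITION & SPEC =====
def Spec_get_fully_cached_name_py (original_name : String) (sequence_length : List (String × Int)) (out : String) : Prop := out = get_fully_cached_name_py_alt original_name sequence_length
instance (original_name : String) (sequence_length : List (String × Int)) (out : String) : Decidable (Spec_get_fully_cached_name_py original_name sequence_length out) := by unfold Spec_get_fully_cached_name_py; infer_instance

-- ===== CLAIM (what is proved, stated in full; the proofs are below) =====
def Claim_equal_get_fully_cached_name_py : Prop := ∀ (original_name : String) (sequence_length : List (String × Int)), Dom_get_fully_cached_name_py original_name sequence_length → Spec_get_fully_cached_name_py original_name sequence_length (get_fully_cached_name_py original_name sequence_length)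

-- ===== LEMMAS AND PROOFS =====

lemma pvBOk_iff_nodup (keys : List String) (L : Nat) :
    pvBOk keys L = true ↔ (keys.map (fun k => PySem.Str.slice k none (some (L : Int)))).Nodup := by
  unfold pvBOk
  rw [beq_iff_eq]
  set xs := keys.map (fun k => PySem.Str.slice k none (some (L : Int))) with hxs
  have hlen : xs.length = keys.length := List.length_map ..
  constructor
  · intro h
    have hsub : PySem.Set.ofList xs ⊆ xs := fun y hy => (PySem.Set.mem_ofList xs y).mp hy
    have hsp : List.Subperm (PySem.Set.ofList xs) xs :=
      (PySem.Set.nodup_ofList xs).subperm hsub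
    have hperm := List.Subperm.perm_of_length_le hsp (by omega)
    exact hperm.nodup (PySem.Set.nodup_ofList xs)
  · intro h
    rw [PySem.Set.ofList_eq_self_of_nodup xs h, hlen]

lemma pvBOk_mono (keys : List String) (L : Nat) (h : pvBOk keys L = true) :
    pvBOk keys (L + 1) = true := by
  rw [pvBOk_iff_nodup] at h ⊢
  rw [List.Nodup, List.pairwise_map] at h ⊢
  refine h.imp ?_
  intro a b hne heq
  apply hne
  apply String.toList_inj.mp
  have ha := congrArg String.toList heq
  rw [pvToList_slice, pvToList_slice] at ha
  have hb := congrArg (List.take L) ha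
  rw [List.take_take, List.take_take, min_eq_left (Nat.le_succ L)] at hb
  rw [pvToList_slice, pvToList_slice]
  exact hb

lemma pvBOk_mono_le (keys : List String) (m n : Nat) (hmn : m ≤ n)
    (h : pvBOk keys m = true) : pvBOk keys n = true := by
  induction n, hmn using Nat.le_induction with
  | base => exact h
  | succ n _ ih => exact pvBOk_mono keys n ih

lemma pvBOk_top (keys : List String) (hnd : keys.Nodup) (L : Nat) (h : pvMaxKeyLen keys ≤ L) :
    pvBOk keys L = true := by
  rw [pvBOk_iff_nodup, pvMap_slice_eq_self keys L h]
  exact hnd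

-- A's condition is the negation of B's predicate
lemma pvBOk_eq_cond (keys : List String) (L : Nat) :
    pvBOk keys L = true ↔ pvAPrefSetLen keys L = keys.length := by
  unfold pvBOk pvAPrefSetLen
  rw [beq_iff_eq]

lemma pvALoop_spec (keys : List String) (hnd : keys.Nodup) (L : Nat) :
    pvBOk keys (pvALoop keys hnd L) = true ∧ L ≤ pvALoop keys hnd L ∧
      ∀ m, L ≤ m → m < pvALoop keys hnd L → pvBOk keys m = false := by
  fun_induction pvALoop keys hnd L with
  | case1 L hcond ih =>
    refine ⟨ih.1, by have := ih.2.1; omega, ?_⟩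
    intro m hLm hmr
    rcases Nat.eq_or_lt_of_le hLm with h | h
    · rcases Bool.eq_false_or_eq_true (pvBOk keys m) with ht | hf
      · exact absurd ((pvBOk_eq_cond keys m).mp ht) (h ▸ hcond)
      · exact hf
    · exact ih.2.2 m h hmr
  | case2 L hcond =>
    rw [not_ne_iff] at hcond
    exact ⟨(pvBOk_eq_cond keys L).mpr hcond, le_refl L, fun m h1 h2 => absurd h1 (by omega)⟩

lemma pvBSearch_spec (keys : List String) :
    ∀ lo hi, lo ≤ hi → pvBOk keys hi = true → (∀ m, m < lo → pvBOk keys m = false) →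
      pvBOk keys (pvBSearch keys lo hi) = true ∧
        ∀ m, m < pvBSearch keys lo hi → pvBOk keys m = false := by
  intro lo hi
  fun_induction pvBSearch keys lo hi with
  | case1 lo hi hlt mid hok ih =>
    intro _ _ hlow
    have hmid : mid = (lo + hi) / 2 := rfl
    exact ih (by omega) hok hlow
  | case2 lo hi hlt mid hok ih =>
    intro _ hhi hlow
    have hmid : mid = (lo + hi) / 2 := rfl
    have hlow' : ∀ m, m < mid + 1 → pvBOk keys m = false := by
      intro m hm
      rcases Bool.eq_false_or_eq_true (pvBOk keys m) with ht | hf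
      · exact absurd (pvBOk_mono_le keys m mid (by omega) ht) hok
      · exact hf
    exact ih (by omega) hhi hlow'
  | case3 lo hi hlt =>
    intro hle hhi hlow
    have : lo = hi := by omega
    subst this
    exact ⟨hhi, hlow⟩

lemma pvLoop_eq_search (keys : List String) (hnd : keys.Nodup) :
    pvALoop keys hnd 0 = pvBSearch keys 0 (pvMaxKeyLen keys) := by
  obtain ⟨ha1, _, ha3⟩ := pvALoop_spec keys hnd 0
  obtain ⟨hb1, hb3⟩ := pvBSearch_spec keys 0 (pvMaxKeyLen keys) (Nat.zero_le _)
    (pvBOk_top keys hnd _ le_rfl) (fun m hm => absurd hm (by omega))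
  rcases Nat.lt_trichotomy (pvALoop keys hnd 0) (pvBSearch keys 0 (pvMaxKeyLen keys)) with h | h | h
  · rw [hb3 _ h] at ha1; simp at ha1
  · exact h
  · rw [ha3 _ (Nat.zero_le _) h] at hb1; simp at hb1

-- ===== VERDICT (by name: the statement is the Claim_ definition above) =====
theorem get_fully_cached_name_py_spec : Claim_equal_get_fully_cached_name_py := by
  intro original_name sequence_length _
  unfold Spec_get_fully_cached_name_py get_fully_cached_name_py get_fully_cached_name_py_alt
  dsimp only
  have hnd : (PySem.Dict.ofList sequence_length).keys.Nodup :=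
    PySem.Dict.nodup_keys_ofList sequence_length
  rw [pvLoop_eq_search _ hnd]
  rw [PySem.Dict.items_eq_map_keys _ hnd 0, List.map_map]
  rfl
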